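-- pv_equiv track=rewrite | github.com/JeyeSama/Ares-INFOIII-LimbajeFormale | LAB2/TP2.2.py | detectare_cat
-- ===== SOURCE A (Python) =====
-- def detectare_cat(text):
--     """Verifica daca textul contine cuvantul 'cat' folosind un automat finit"""
--     stare = 'q0'
--     tranzitii = {
--         ('q0', 'c'): 'q1', ('q0', '_'): 'q0',
--         ('q1', 'a'): 'q2', ('q1', 'c'): 'q1', ('q1', '_'): 'q0',
--         ('q2', 't'): 'q3', ('q2', 'c'): 'q1', ('q2', '_'): 'q0',
--         ('q3', '_'): 'q3'  # Odata ce am gasit "cat", ramane in stare finala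
--     }
--
--     for caracter in text:
--         if caracter not in "abcdefghijklmnopqrstuvwxyz":
--             caracter = "_"  # Orice caracter necunoscut duce la resetare (spatiu, numere etc.)
--         stare = tranzitii.get((stare, caracter), 'q0')
--
--         if stare == 'q3':
--             return True  # Am detectat "cat"
--
--     return False  # Nu am gasit "cat"
-- ===== SOURCE B (Python) =====
-- def detectare_cat(text):
--     """Verifica daca textul contine cuvantul 'cat' folosind un automat finit"""
--     return "cat" in text
-- ===== Notes on version B (the rewrite author's own statement) =====
-- stated objective: simpler
-- what changed: Replaces the hand-written finite automaton (state dictionary stepped character by character) with a single built-in substring test "cat" in text.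
import Mathlib
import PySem

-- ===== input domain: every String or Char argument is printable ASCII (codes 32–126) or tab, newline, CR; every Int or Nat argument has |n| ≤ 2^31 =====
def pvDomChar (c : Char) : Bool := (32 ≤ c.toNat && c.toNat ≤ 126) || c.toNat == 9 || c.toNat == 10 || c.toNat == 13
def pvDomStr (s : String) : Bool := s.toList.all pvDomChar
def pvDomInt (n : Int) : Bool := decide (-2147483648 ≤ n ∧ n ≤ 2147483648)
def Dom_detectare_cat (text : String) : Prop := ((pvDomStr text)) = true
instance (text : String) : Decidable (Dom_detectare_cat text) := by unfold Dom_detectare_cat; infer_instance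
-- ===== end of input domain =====

-- B replaces A's hand-written finite automaton with the idiomatic substring test `"cat" in text` (objective: simpler).

-- ===== PORT A =====
-- A's transition dictionary, keys are (state, character) pairs, built in A's insertion order
def pvTranzitii : PySem.Dict (String × Char) String :=
  (((((((((PySem.Dict.empty
    ).insert ("q0", 'c') "q1").insert ("q0", '_') "q0"
    ).insert ("q1", 'a') "q2").insert ("q1", 'c') "q1").insert ("q1", '_') "q0"
    ).insert ("q2", 't') "q3").insert ("q2", 'c') "q1").insert ("q2", '_') "q0"
    ).insert ("q3", '_') "q3"

-- the `for caracter in text` loop with its early `return True`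
def pvLoopA (stare : String) (cs : List Char) : Bool :=
  match cs with
  | [] => false                                   -- fell off the loop: return False
  | caracter :: rest =>
      let c := if "abcdefghijklmnopqrstuvwxyz".toList.contains caracter then caracter else '_'
      let stare' := PySem.Dict.getD pvTranzitii (stare, c) "q0"
      if stare' == "q3" then true else pvLoopA stare' rest

def detectare_cat (text : String) : Bool := pvLoopA "q0" text.toList

-- ===== PORT B =====
def detectare_cat_alt (text : String) : Bool := PySem.Str.isIn "cat" text

-- ===== PRECONDITION & SPEC =====
def Spec_detectare_cat (text : String) (out : Bool) : Prop := out = detectare_cat_alt text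
instance (text : String) (out : Bool) : Decidable (Spec_detectare_cat text out) := by unfold Spec_detectare_cat; infer_instance

-- ===== CLAIM (what is proved, stated in full; the proofs are below) =====
def Claim_equal_detectare_cat : Prop := ∀ (text : String), Dom_detectare_cat text → Spec_detectare_cat text (detectare_cat text)

-- ===== LEMMAS AND PROOFS =====

-- the automaton's transition function, state by state, as `if` characterisations of the dict lookups
theorem pvGetD_q0 (c : Char) :
    PySem.Dict.getD pvTranzitii ("q0", c) "q0" = if c = 'c' then "q1" else "q0" := by
  by_cases h : c = 'c' <;> by_cases h2 : c = '_' <;>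
    (simp only [pvTranzitii, PySem.Dict.getD_insert, Prod.mk.injEq] <;>
     simp_all [PySem.Dict.getD, PySem.Dict.get?, PySem.Dict.empty])

theorem pvGetD_q1 (c : Char) :
    PySem.Dict.getD pvTranzitii ("q1", c) "q0" =
      if c = 'a' then "q2" else if c = 'c' then "q1" else "q0" := by
  by_cases h1 : c = 'a' <;> by_cases h2 : c = 'c' <;> by_cases h3 : c = '_' <;>
    (simp only [pvTranzitii, PySem.Dict.getD_insert, Prod.mk.injEq] <;>
     simp_all [PySem.Dict.getD, PySem.Dict.get?, PySem.Dict.empty])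

theorem pvGetD_q2 (c : Char) :
    PySem.Dict.getD pvTranzitii ("q2", c) "q0" =
      if c = 't' then "q3" else if c = 'c' then "q1" else "q0" := by
  by_cases h1 : c = 't' <;> by_cases h2 : c = 'c' <;> by_cases h3 : c = '_' <;>
    (simp only [pvTranzitii, PySem.Dict.getD_insert, Prod.mk.injEq] <;>
     simp_all [PySem.Dict.getD, PySem.Dict.get?, PySem.Dict.empty])

-- loop invariant: what the run from each reachable state computes
set_option maxRecDepth 8000 in
theorem pvLoopA_char (cs : List Char) :
    pvLoopA "q0" cs = decide (['c','a','t'] <:+: cs) ∧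
    pvLoopA "q1" cs = (decide (['c','a','t'] <:+: cs) || decide (['a','t'] <+: cs)) ∧
    pvLoopA "q2" cs = (decide (['c','a','t'] <:+: cs) || decide (['t'] <+: cs)) := by
  induction cs with
  | nil => simp [pvLoopA]
  | cons c rest ih =>
    obtain ⟨ih0, ih1, ih2⟩ := ih
    refine ⟨?_, ?_, ?_⟩ <;>
    · simp only [pvLoopA]
      by_cases hl : "abcdefghijklmnopqrstuvwxyz".toList.contains c
      · simp only [hl, if_true]
        clear hl
        by_cases ha : c = 'a' <;> by_cases hc : c = 'c' <;> by_cases ht : c = 't' <;>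
          simp_all [pvGetD_q0, pvGetD_q1, pvGetD_q2, List.infix_cons_iff,
            List.cons_prefix_cons, eq_comm, Bool.or_comm]
      · have hl' : "abcdefghijklmnopqrstuvwxyz".toList.contains c = false :=
          Bool.not_eq_true _ ▸ eq_false_of_ne_true hl
        have ha : c ≠ 'a' := by rintro rfl; exact hl (by decide)
        have hc : c ≠ 'c' := by rintro rfl; exact hl (by decide)
        have ht : c ≠ 't' := by rintro rfl; exact hl (by decide)
        simp only [hl', if_false]
        simp [pvGetD_q0, pvGetD_q1, pvGetD_q2, ih0, ih1, ih2, List.infix_cons_iff,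
          List.cons_prefix_cons, eq_comm, ha, hc, ht]

-- ===== VERDICT (by name: the statement is the Claim_ definition above) =====
theorem detectare_cat_spec : Claim_equal_detectare_cat := by
  intro text _
  unfold Spec_detectare_cat detectare_cat detectare_cat_alt
  rw [(pvLoopA_char text.toList).1]
  have key : PySem.Str.isIn "cat" text = PySem.Chars.isIn ['c', 'a', 't'] text.toList := by
    have hts : "cat".toList = ['c', 'a', 't'] := by decide
    simp [← hts]
  by_cases hi : ['c', 'a', 't'] <:+: text.toList
  · simp [hi, key, (PySem.Chars.isIn_iff_infix _ _).mpr hi]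
  · simp [hi, key, (PySem.Chars.isIn_eq_false_iff _ _).mpr hi]
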